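-- pv_equiv track=rewrite | github.com/NatalyZ/journal | help_journal.py | nice_date
-- ===== SOURCE A (Python) =====
-- def nice_date(dates_set, date_begin, date_end):
--     dates_list = list(dates_set)
--     dates_list.sort()
--     dates_nice = []
--     for date in dates_list:
--         if (date >= date_begin) and (date <= date_end):
--             dates_nice.append(str(date)[8:] + '.' + str(date)[5:7])
--     return dates_nice
-- ===== SOURCE B (Python) =====
-- def nice_date(dates_set, date_begin, date_end):
--     ds = sorted(dates_set)
--     n = len(ds)
--     i = 0
--     while i < n and ds[i] < date_begin:
--         i += 1
--     out = []
--     while i < n and ds[i] <= date_end: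
--         d = ds[i]
--         out.append(d[8:] + '.' + d[5:7])
--         i += 1
--     return out
-- ===== Notes on version B (the rewrite author's own statement) =====
-- stated objective: alternative
-- what changed: Instead of scanning the whole sorted list and testing both bounds on every element, B skips the prefix below date_begin with one loop, then collects and formats elements in a second loop that stops at the first element above date_end (early exit, one comparison per element).
import Mathlib
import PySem

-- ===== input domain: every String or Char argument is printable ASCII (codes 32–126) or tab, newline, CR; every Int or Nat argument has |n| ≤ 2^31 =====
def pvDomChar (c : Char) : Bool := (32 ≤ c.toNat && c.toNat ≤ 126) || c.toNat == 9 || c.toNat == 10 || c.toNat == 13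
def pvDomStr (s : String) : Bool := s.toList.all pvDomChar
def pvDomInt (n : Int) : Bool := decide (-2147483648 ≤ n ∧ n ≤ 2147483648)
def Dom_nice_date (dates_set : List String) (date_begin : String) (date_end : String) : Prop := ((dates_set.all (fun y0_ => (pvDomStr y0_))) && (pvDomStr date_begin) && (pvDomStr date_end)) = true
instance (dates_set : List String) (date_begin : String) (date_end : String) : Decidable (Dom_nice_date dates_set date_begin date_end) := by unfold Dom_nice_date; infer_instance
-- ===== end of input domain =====

-- B replaces A's full scan-with-branch by a sorted two-phase bounded scan (skip the prefix below date_begin, then collect while ≤ date_end, stopping early); objective: alternative (not measured faster — sorting dominates).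


-- ===== PORT A =====
def nice_date (dates_set : List String) (date_begin : String) (date_end : String) : List String :=
  let dates_list := PySem.List.sorted dates_set (fun x => x) false
  dates_list.foldl (fun dates_nice date =>
    if decide (date_begin ≤ date) && decide (date ≤ date_end) then
      dates_nice ++ [PySem.Str.slice date (some 8) none ++ "." ++ PySem.Str.slice date (some 5) (some 7)]
    else dates_nice) []

-- ===== PORT B =====
-- first while loop of Source B: advance i past entries below date_begin
def pvSkip (ds : List String) (date_begin : String) (i : Nat) : Nat :=
  if h : i < ds.length then
    if ds[i] < date_begin then pvSkip ds date_begin (i + 1) else i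
  else i
termination_by ds.length - i

-- second while loop of Source B: append formatted entries while ≤ date_end
def pvCollect (ds : List String) (date_end : String) (i : Nat) (out : List String) : List String :=
  if h : i < ds.length then
    if ds[i] ≤ date_end then
      pvCollect ds date_end (i + 1)
        (out ++ [PySem.Str.slice ds[i] (some 8) none ++ "." ++ PySem.Str.slice ds[i] (some 5) (some 7)])
    else out
  else out
termination_by ds.length - i

def nice_date_alt (dates_set : List String) (date_begin : String) (date_end : String) : List String :=
  let ds := PySem.List.sorted dates_set (fun x => x) false
  pvCollect ds date_end (pvSkip ds date_begin 0) []

-- ===== PRECONDITION & SPEC =====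
def Spec_nice_date (dates_set : List String) (date_begin : String) (date_end : String) (out : List String) : Prop := out = nice_date_alt dates_set date_begin date_end
instance (dates_set : List String) (date_begin : String) (date_end : String) (out : List String) : Decidable (Spec_nice_date dates_set date_begin date_end out) := by unfold Spec_nice_date; infer_instance

-- ===== CLAIM (what is proved, stated in full; the proofs are below) =====
def Claim_equal_nice_date : Prop := ∀ (dates_set : List String) (date_begin : String) (date_end : String), Dom_nice_date dates_set date_begin date_end → Spec_nice_date dates_set date_begin date_end (nice_date dates_set date_begin date_end)

-- ===== LEMMAS AND PROOFS =====

-- the skip loop lands right after the (<date_begin)-prefix of the remaining list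
theorem pvSkip_spec (ds : List String) (b : String) (i : Nat) :
    pvSkip ds b i = i + ((ds.drop i).takeWhile (fun d => decide (d < b))).length := by
  rw [pvSkip]
  by_cases h : i < ds.length
  · rw [List.drop_eq_getElem_cons h]
    simp only [dif_pos h, List.takeWhile_cons]
    by_cases hc : ds[i] < b
    · simp only [hc, decide_true, if_pos, List.length_cons]
      rw [pvSkip_spec ds b (i + 1)]; omega
    · simp [hc]
  · rw [List.drop_eq_nil_of_le (le_of_not_gt h)]
    simp [h]
termination_by ds.length - i

-- the collect loop appends the formatted (≤ date_end)-prefix of the remaining list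
theorem pvCollect_spec (ds : List String) (e : String) (i : Nat) (out : List String) :
    pvCollect ds e i out = out ++
      ((ds.drop i).takeWhile (fun d => decide (d ≤ e))).map
        (fun d => PySem.Str.slice d (some 8) none ++ "." ++ PySem.Str.slice d (some 5) (some 7)) := by
  rw [pvCollect]
  by_cases h : i < ds.length
  · rw [List.drop_eq_getElem_cons h]
    simp only [dif_pos h, List.takeWhile_cons]
    by_cases hc : ds[i] ≤ e
    · simp only [hc, decide_true, if_pos, List.map_cons]
      rw [pvCollect_spec ds e (i + 1)]; simp
    · simp [hc]
  · rw [List.drop_eq_nil_of_le (le_of_not_gt h)]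
    simp [h]
termination_by ds.length - i

-- on a sorted list, filtering (· ≤ e) is taking the (· ≤ e)-prefix
theorem filter_le_eq_takeWhile (e : String) :
    ∀ ds : List String, ds.Pairwise (· ≤ ·) →
      ds.filter (fun d => decide (d ≤ e)) = ds.takeWhile (fun d => decide (d ≤ e)) := by
  intro ds hp
  induction ds with
  | nil => rfl
  | cons x t ih =>
    rcases List.pairwise_cons.mp hp with ⟨hall, ht⟩
    by_cases hx : x ≤ e
    · simp only [List.filter_cons, List.takeWhile_cons, hx, decide_true, if_pos]
      rw [ih ht]
    · simp only [List.filter_cons, List.takeWhile_cons, hx, decide_false, if_neg,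
        Bool.false_eq_true, not_false_iff]
      rw [List.filter_eq_nil_iff.mpr]
      intro y hy
      simp only [decide_eq_true_eq]
      exact fun hye => hx (le_trans (hall y hy) hye)

-- on a sorted list, the range filter is dropWhile-then-takeWhile
theorem filter_range_eq (b e : String) :
    ∀ ds : List String, ds.Pairwise (· ≤ ·) →
      ds.filter (fun d => decide (b ≤ d) && decide (d ≤ e)) =
        (ds.dropWhile (fun d => decide (d < b))).takeWhile (fun d => decide (d ≤ e)) := by
  intro ds hp
  induction ds with
  | nil => rfl
  | cons x t ih =>
    rcases List.pairwise_cons.mp hp with ⟨hall, ht⟩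
    by_cases hx : x < b
    · have hnb : ¬ b ≤ x := not_le.mpr hx
      simp only [List.filter_cons, List.dropWhile_cons, hx, hnb, decide_true, decide_false,
        Bool.false_and, if_pos, Bool.false_eq_true, if_neg, not_false_iff]
      exact ih ht
    · have hb : b ≤ x := not_lt.mp hx
      simp only [List.filter_cons, List.dropWhile_cons, hx, hb, decide_true, decide_false,
        Bool.true_and, if_neg, Bool.false_eq_true, not_false_iff, List.takeWhile_cons]
      by_cases hxe : x ≤ e
      · simp only [hxe, decide_true, if_pos]
        have hge : ∀ y ∈ t, b ≤ y := fun y hy => le_trans hb (hall y hy)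
        rw [List.filter_congr (fun y hy => by rw [decide_eq_true (hge y hy), Bool.true_and]), filter_le_eq_takeWhile e t ht]
      · simp only [hxe, decide_false, Bool.false_eq_true, if_neg, not_false_iff]
        rw [List.filter_eq_nil_iff.mpr]
        intro y hy
        simp only [Bool.and_eq_true, decide_eq_true_eq, not_and]
        exact fun _ hye => hxe (le_trans (hall y hy) hye)

-- drop past the (< b)-prefix length is exactly dropWhile (glue for pvSkip_spec/pvCollect_spec)
theorem drop_length_takeWhile_eq_dropWhile (p : String → Bool) (l : List String) :
    l.drop (l.takeWhile p).length = l.dropWhile p := by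
  calc l.drop (l.takeWhile p).length
      = (l.takeWhile p ++ l.dropWhile p).drop (l.takeWhile p).length := by
        rw [List.takeWhile_append_dropWhile]
    _ = l.dropWhile p := List.drop_left

-- ===== VERDICT (by name: the statement is the Claim_ definition above) =====
theorem nice_date_spec : Claim_equal_nice_date := by
  intro dates_set b e _
  simp only [Spec_nice_date, nice_date, nice_date_alt]
  set ds := PySem.List.sorted dates_set (fun x => x) false with hds
  have hpair : ds.Pairwise (· ≤ ·) := PySem.List.sorted_pairwise dates_set (fun x => x)
  rw [PySem.List.foldl_append_if, pvSkip_spec, pvCollect_spec]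
  simp only [Nat.zero_add, List.drop_zero, List.nil_append]
  rw [filter_range_eq b e ds hpair, ← drop_length_takeWhile_eq_dropWhile]
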